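-- pv_equiv track=rewrite | github.com/JamesEBall/BarterBench | eval.py | build_benchmark_config
-- ===== SOURCE A (Python) =====
-- def build_benchmark_config(anchor, test_models, num_agents):
--     """Build model config for benchmark: half anchor, rest split across test models."""
--     anchor_count = num_agents // 2
--     remaining = num_agents - anchor_count
--
--     config = [(anchor, anchor_count)]
--     if test_models:
--         base = remaining // len(test_models)
--         extra = remaining % len(test_models)
--         for i, model in enumerate(test_models):
--             count = base + (1 if i < extra else 0)
--             if count > 0:
--                 config.append((model, count))
--
--     config_str = ",".join(f"{m}:{c}" for m, c in config)
--     return config, config_str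
-- ===== SOURCE B (Python) =====
-- def build_benchmark_config(anchor, test_models, num_agents):
--     """Build model config for benchmark: half anchor, rest split across test models."""
--     anchor_count = num_agents // 2
--     config = [(anchor, anchor_count)]
--     pool = num_agents - anchor_count
--     n = len(test_models)
--     for i, model in enumerate(test_models):
--         count = -(-pool // (n - i))  # ceil-division share of what is left
--         pool -= count
--         if count > 0:
--             config.append((model, count))
--     config_str = ",".join("{}:{}".format(m, c) for m, c in config)
--     return config, config_str
-- ===== Notes on version B (the rewrite author's own statement) =====
-- stated objective: alternative
-- what changed: Replaces the precomputed quotient/remainder split (base = remaining // n, extra = remaining % n, +1 for the first `extra` models) by a greedy running-pool distribution: each model takes the ceiling share -(-pool // models_left) of what is still left, which also removes the truthiness guard on test_models.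
import Mathlib
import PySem

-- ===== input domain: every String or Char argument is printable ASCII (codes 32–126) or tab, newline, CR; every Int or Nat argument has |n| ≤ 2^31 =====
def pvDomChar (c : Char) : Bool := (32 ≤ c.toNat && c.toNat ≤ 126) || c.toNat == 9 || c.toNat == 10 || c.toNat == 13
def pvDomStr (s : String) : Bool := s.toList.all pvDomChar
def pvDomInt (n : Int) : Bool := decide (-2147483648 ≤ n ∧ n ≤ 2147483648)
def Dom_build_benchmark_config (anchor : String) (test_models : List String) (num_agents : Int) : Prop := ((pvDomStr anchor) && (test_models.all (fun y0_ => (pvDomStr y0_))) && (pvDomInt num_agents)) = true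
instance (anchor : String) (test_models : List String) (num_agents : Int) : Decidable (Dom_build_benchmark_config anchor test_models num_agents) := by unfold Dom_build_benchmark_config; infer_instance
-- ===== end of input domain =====

-- B replaces the precomputed quotient/remainder split by a greedy running-pool
-- ceil-division distribution (same values, different decomposition; objective: alternative).

-- ===== PORT A =====
def build_benchmark_config (anchor : String) (test_models : List String) (num_agents : Int) : (List (String × Int)) × String :=
  let anchor_count := PySem.Int.floordiv num_agents 2
  let remaining := num_agents - anchor_count
  let config0 : List (String × Int) := [(anchor, anchor_count)]
  let config :=
    if test_models.isEmpty then config0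
    else
      let base := PySem.Int.floordiv remaining (test_models.length : Int)
      let extra := PySem.Int.mod remaining (test_models.length : Int)
      (PySem.List.enumerate test_models).foldl
        (fun cfg im =>
          let count := base + (if im.1 < extra then 1 else 0)
          if count > 0 then cfg ++ [(im.2, count)] else cfg) config0
  (config, PySem.Str.join "," (config.map (fun p => p.1 ++ ":" ++ PySem.Int.toStr p.2)))

-- ===== PORT B =====
-- the loop of Source B: divisor n - i is exactly the length of the not-yet-visited suffix
def bbcGreedy (pool : Int) : List String → List (String × Int)
  | [] => []
  | m :: rest =>
    let count := -(PySem.Int.floordiv (-pool) ((m :: rest).length : Int))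
    let tail := bbcGreedy (pool - count) rest
    if count > 0 then (m, count) :: tail else tail

def build_benchmark_config_alt (anchor : String) (test_models : List String) (num_agents : Int) : (List (String × Int)) × String :=
  let anchor_count := PySem.Int.floordiv num_agents 2
  let config := (anchor, anchor_count) :: bbcGreedy (num_agents - anchor_count) test_models
  (config, PySem.Str.join "," (config.map (fun p => p.1 ++ ":" ++ PySem.Int.toStr p.2)))

-- ===== PRECONDITION & SPEC =====
def Spec_build_benchmark_config (anchor : String) (test_models : List String) (num_agents : Int) (out : (List (String × Int)) × String) : Prop := out = build_benchmark_config_alt anchor test_models num_agents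
instance (anchor : String) (test_models : List String) (num_agents : Int) (out : (List (String × Int)) × String) : Decidable (Spec_build_benchmark_config anchor test_models num_agents out) := by unfold Spec_build_benchmark_config; infer_instance

-- ===== CLAIM (what is proved, stated in full; the proofs are below) =====
def Claim_equal_build_benchmark_config : Prop := ∀ (anchor : String) (test_models : List String) (num_agents : Int), Dom_build_benchmark_config anchor test_models num_agents → Spec_build_benchmark_config anchor test_models num_agents (build_benchmark_config anchor test_models num_agents)

-- ===== LEMMAS AND PROOFS =====

-- reference distribution: per-step share with a decrementing "extra" counter
def bbcG (base : Int) : Int → List String → List (String × Int)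
  | _, [] => []
  | extra, m :: rest =>
    let c := base + (if 0 < extra then 1 else 0)
    if c > 0 then (m, c) :: bbcG base (extra - 1) rest else bbcG base (extra - 1) rest

theorem bbcG_nonpos (base : Int) : ∀ (ms : List String) (e e' : Int), e ≤ 0 → e' ≤ 0 →
    bbcG base e ms = bbcG base e' ms := by
  intro ms
  induction ms with
  | nil => intro e e' _ _; rfl
  | cons m rest ih =>
    intro e e' he he'
    simp only [bbcG, if_neg (by omega : ¬ 0 < e), if_neg (by omega : ¬ 0 < e')]
    rw [ih (e - 1) (e' - 1) (by omega) (by omega)]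

theorem bbc_ceil_eq (pool n q r : Int) (hn : 0 < n)
    (hq : q = PySem.Int.floordiv pool n) (hr : r = PySem.Int.mod pool n) :
    -(PySem.Int.floordiv (-pool) n) = q + (if 0 < r then 1 else 0) := by
  have hqr := PySem.Int.floordiv_mul_add_mod pool n
  have hr0 : 0 ≤ r := by
    rw [hr, PySem.Int.mod_eq_emod_of_pos hn]; exact Int.emod_nonneg _ (by omega)
  have hrn : r < n := by
    rw [hr, PySem.Int.mod_eq_emod_of_pos hn]; exact Int.emod_lt_of_pos _ hn
  rw [← hq, ← hr] at hqr
  rw [PySem.Int.neg_floordiv_neg_eq_iff_of_pos hn]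
  constructor <;> (split_ifs with h <;> nlinarith)

theorem bbc_pool_step (pool n q r : Int) (hn : 1 < n)
    (hq : q = PySem.Int.floordiv pool n) (hr : r = PySem.Int.mod pool n) :
    PySem.Int.floordiv (pool - (q + (if 0 < r then 1 else 0))) (n - 1) = q ∧
    PySem.Int.mod (pool - (q + (if 0 < r then 1 else 0))) (n - 1)
      = r - (if 0 < r then 1 else 0) := by
  have hqr := PySem.Int.floordiv_mul_add_mod pool n
  have hr0 : 0 ≤ r := by
    rw [hr, PySem.Int.mod_eq_emod_of_pos (by omega)]; exact Int.emod_nonneg _ (by omega)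
  have hrn : r < n := by
    rw [hr, PySem.Int.mod_eq_emod_of_pos (by omega)]; exact Int.emod_lt_of_pos _ (by omega)
  rw [← hq, ← hr] at hqr
  have hdiv : PySem.Int.floordiv (pool - (q + (if 0 < r then 1 else 0))) (n - 1) = q := by
    rw [PySem.Int.floordiv_eq_iff_of_pos (by omega)]
    constructor <;> (split_ifs with h <;> nlinarith)
  refine ⟨hdiv, ?_⟩
  have hm := PySem.Int.floordiv_mul_add_mod (pool - (q + (if 0 < r then 1 else 0))) (n - 1)
  rw [hdiv] at hm
  split_ifs at hm ⊢ with h <;> nlinarith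

theorem bbc_eq_G : ∀ (ms : List String) (pool : Int), ms ≠ [] →
    bbcGreedy pool ms
      = bbcG (PySem.Int.floordiv pool (ms.length : Int))
             (PySem.Int.mod pool (ms.length : Int)) ms := by
  intro ms
  induction ms with
  | nil => intro pool h; exact absurd rfl h
  | cons m rest ih =>
    intro pool _
    set n : Int := ((m :: rest).length : Int) with hn
    have hn1 : 0 < n := by simp [hn]
    set q := PySem.Int.floordiv pool n with hq
    set r := PySem.Int.mod pool n with hr
    have hcount := bbc_ceil_eq pool n q r hn1 hq hr
    simp only [bbcGreedy, ← hn, hcount]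
    set e : Int := (if 0 < r then 1 else 0) with he
    cases rest with
    | nil =>
      simp only [bbcG, bbcGreedy, ← he]
    | cons x xs =>
      have hn2 : 1 < n := by simp [hn]
      obtain ⟨hq', hr'⟩ := bbc_pool_step pool n q r hn2 hq hr
      have hlen : ((x :: xs).length : Int) = n - 1 := by simp [hn]
      rw [← he] at hq' hr'
      rw [ih (pool - (q + e)) (by simp), hlen, hq', hr']
      have hG : bbcG q (r - e) (x :: xs) = bbcG q (r - 1) (x :: xs) := by
        by_cases h : 0 < r
        · simp [he, h]
        · have he0 : e = 0 := by simp [he, h]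
          have hr0 : 0 ≤ r := by
            rw [hr, PySem.Int.mod_eq_emod_of_pos hn1]; exact Int.emod_nonneg _ (by omega)
          exact bbcG_nonpos q (x :: xs) (r - e) (r - 1) (by omega) (by omega)
      rw [hG]
      simp only [bbcG, ← he]

theorem bbc_foldA (base extra : Int) :
    ∀ (ms : List String) (acc : List (String × Int)) (s : Int),
    (PySem.List.enumerate ms s).foldl
        (fun cfg im =>
          let count := base + (if im.1 < extra then 1 else 0)
          if count > 0 then cfg ++ [(im.2, count)] else cfg) acc
      = acc ++ bbcG base (extra - s) ms := by
  intro ms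
  induction ms with
  | nil => intro acc s; simp [PySem.List.enumerate_nil, bbcG]
  | cons m rest ih =>
    intro acc s
    rw [PySem.List.enumerate_cons]
    simp only [List.foldl_cons]
    rw [ih]
    have hc : (s < extra) = (0 < extra - s) := by
      by_cases h : s < extra <;> simp [h]
    have hes : extra - (s + 1) = (extra - s) - 1 := by omega
    rw [hes]
    simp only [bbcG, hc]
    split_ifs with h <;> simp

-- ===== VERDICT (by name: the statement is the Claim_ definition above) =====
theorem build_benchmark_config_spec : Claim_equal_build_benchmark_config := by
  intro anchor test_models num_agents _
  unfold Spec_build_benchmark_config build_benchmark_config build_benchmark_config_alt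
  cases test_models with
  | nil => rfl
  | cons m rest =>
    simp only [List.isEmpty_cons, if_neg (by decide : ¬ (false = true))]
    rw [bbc_foldA, bbc_eq_G _ _ (by simp)]
    simp
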